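-- pv_equiv track=rewrite | github.com/adpena/molt | src/molt/stdlib/codecs.py | _normalize_search_name
-- ===== SOURCE A (Python) =====
-- def _normalize_search_name(encoding: object) -> str:
--     if not isinstance(encoding, str):
--         raise TypeError(f"lookup() argument must be str, not {type(encoding).__name__}")
--     out: list[str] = []
--     punct = False
--     for ch in encoding:
--         if ch.isalnum() or ch == ".":
--             if punct and out:
--                 out.append("_")
--             out.append(ch.lower())
--             punct = False
--         else:
--             punct = True
--     return "".join(out)
-- ===== SOURCE B (Python) =====
-- def _normalize_search_name(encoding: object) -> str:
--     if not isinstance(encoding, str):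
--         raise TypeError(f"lookup() argument must be str, not {type(encoding).__name__}")
--     tokens: list[str] = []
--     i = 0
--     n = len(encoding)
--     while i < n:
--         if encoding[i].isalnum() or encoding[i] == ".":
--             j = i
--             while j < n and (encoding[j].isalnum() or encoding[j] == "."):
--                 j += 1
--             tokens.append(encoding[i:j].lower())
--             i = j
--         else:
--             i += 1
--     return "_".join(tokens)
-- ===== Notes on version B (the rewrite author's own statement) =====
-- stated objective: idiomatic
-- what changed: Replaced A's single pass with a punct flag and per-char accumulator by a run tokenizer: scan maximal runs of valid (alphanumeric or dot) characters, lowercase each run, and join the tokens with an underscore separator.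
import Mathlib
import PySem

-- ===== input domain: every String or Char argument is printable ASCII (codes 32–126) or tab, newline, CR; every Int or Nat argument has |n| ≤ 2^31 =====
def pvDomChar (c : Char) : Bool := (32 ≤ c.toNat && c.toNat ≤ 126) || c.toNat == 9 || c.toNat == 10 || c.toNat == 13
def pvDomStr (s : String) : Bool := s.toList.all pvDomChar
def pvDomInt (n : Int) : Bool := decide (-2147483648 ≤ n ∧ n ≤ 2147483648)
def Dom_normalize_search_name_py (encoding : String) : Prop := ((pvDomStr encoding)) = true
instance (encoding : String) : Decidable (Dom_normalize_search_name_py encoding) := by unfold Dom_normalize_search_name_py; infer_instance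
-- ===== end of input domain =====

-- B replaces A's punct-flag single pass by a run tokenizer ('_'.join of maximal valid runs); objective: simpler/idiomatic, same O(n).
-- The isinstance/TypeError guard of the Python is outside this port's typed signature (encoding : String is always a str).

-- ===== PORT A =====
-- ch.isalnum() or ch == "."
def pvValid (c : Char) : Bool := PySem.Chars.isalnum c || c == '.'

-- the for-loop of A: state (out, punct)
def pvACore : List Char → List Char → Bool → List Char
  | [], out, _ => out
  | c :: rest, out, punct =>
    if pvValid c then
      pvACore rest ((if punct && !out.isEmpty then out ++ ['_'] else out) ++ [PySem.Chars.lowerChar c]) false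
    else
      pvACore rest out true

def normalize_search_name_py (encoding : String) : String :=
  String.ofList (pvACore encoding.toList [] false)

-- ===== PORT B =====
-- the outer while-loop of B: at a valid char take the maximal valid run (inner while) lowered, else skip one char
def pvBTokens : List Char → List (List Char)
  | [] => []
  | c :: rest =>
    if pvValid c then
      PySem.Chars.lower ((c :: rest).takeWhile pvValid) :: pvBTokens (rest.dropWhile pvValid)
    else
      pvBTokens rest
termination_by l => l.length
decreasing_by
  · simpa using Nat.lt_succ_of_le (rest.length_dropWhile_le pvValid)
  · simp

def normalize_search_name_py_alt (encoding : String) : String :=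
  PySem.Str.join "_" ((pvBTokens encoding.toList).map String.ofList)

-- ===== PRECONDITION & SPEC =====
def Spec_normalize_search_name_py (encoding : String) (out : String) : Prop := out = normalize_search_name_py_alt encoding
instance (encoding : String) (out : String) : Decidable (Spec_normalize_search_name_py encoding out) := by unfold Spec_normalize_search_name_py; infer_instance

-- ===== CLAIM (what is proved, stated in full; the proofs are below) =====
def Claim_equal_normalize_search_name_py : Prop := ∀ (encoding : String), Dom_normalize_search_name_py encoding → Spec_normalize_search_name_py encoding (normalize_search_name_py encoding)

-- ===== LEMMAS AND PROOFS =====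

-- '_'.join written with a leading separator before every token (what A's punct flag emits after the first token)
def pvGlue (ts : List (List Char)) : List Char := ts.flatMap (fun t => '_' :: t)

theorem pvJoin_eq_head_glue (t : List Char) (ts : List (List Char)) :
    PySem.Chars.join ['_'] (t :: ts) = t ++ pvGlue ts := by
  induction ts generalizing t with
  | nil => simp [PySem.Chars.join_singleton, pvGlue]
  | cons u us ih =>
      rw [PySem.Chars.join_cons_cons, ih]
      simp [pvGlue]

theorem pvLower_eq_map (l : List Char) : PySem.Chars.lower l = l.map PySem.Chars.lowerChar := by
  simp [PySem.Chars.lower]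

theorem pvBTokens_cons_pos (c : Char) (rest : List Char) (hv : pvValid c = true) :
    pvBTokens (c :: rest) =
      (PySem.Chars.lowerChar c :: (rest.takeWhile pvValid).map PySem.Chars.lowerChar)
        :: pvBTokens (rest.dropWhile pvValid) := by
  rw [pvBTokens]
  simp [hv, pvLower_eq_map]

theorem pvBTokens_cons_neg (c : Char) (rest : List Char) (hv : pvValid c = false) :
    pvBTokens (c :: rest) = pvBTokens rest := by
  rw [pvBTokens]; simp [hv]

-- A's loop from a nonempty accumulator: punct = true emits a '_' before each further token,
-- punct = false first finishes the current run
theorem pvACore_nonempty (l : List Char) :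
    (∀ out : List Char, out ≠ [] → pvACore l out true = out ++ pvGlue (pvBTokens l)) ∧
    (∀ out : List Char, out ≠ [] →
      pvACore l out false =
        out ++ (l.takeWhile pvValid).map PySem.Chars.lowerChar ++ pvGlue (pvBTokens (l.dropWhile pvValid))) := by
  induction l with
  | nil => simp [pvACore, pvGlue, pvBTokens]
  | cons c rest ih =>
      by_cases hv : pvValid c = true
      · constructor
        · intro out hout
          rw [pvACore]
          simp only [hv, List.isEmpty_eq_false_iff.mpr hout, Bool.not_false, Bool.and_true, if_pos]
          rw [ih.2 (out ++ ['_'] ++ [PySem.Chars.lowerChar c]) (by simp)]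
          rw [pvBTokens_cons_pos c rest hv]
          simp [pvGlue]
        · intro out hout
          rw [pvACore]
          simp only [hv, if_true, Bool.false_and, if_neg (by simp : ¬(false = true))]
          rw [ih.2 (out ++ [PySem.Chars.lowerChar c]) (by simp)]
          simp [hv]
      · have hv' : pvValid c = false := by simpa using hv
        constructor
        · intro out hout
          rw [pvACore]
          simp only [hv', Bool.false_eq_true, if_false]
          rw [ih.1 out hout, pvBTokens_cons_neg c rest hv']
        · intro out hout
          rw [pvACore]
          simp only [hv', Bool.false_eq_true, if_false]
          rw [ih.1 out hout, List.takeWhile_cons_of_neg (by simp [hv']),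
            List.dropWhile_cons_of_neg (by simp [hv']), pvBTokens_cons_neg c rest hv']
          simp

theorem pvACore_empty (l : List Char) (b : Bool) :
    pvACore l [] b = PySem.Chars.join ['_'] (pvBTokens l) := by
  induction l generalizing b with
  | nil => cases b <;> simp [pvACore, pvBTokens, PySem.Chars.join_nil]
  | cons c rest ih =>
      by_cases hv : pvValid c = true
      · rw [pvACore]
        simp only [hv, if_true, List.isEmpty_nil, Bool.not_true, Bool.and_false,
          Bool.false_eq_true, if_false, List.nil_append]
        rw [(pvACore_nonempty rest).2 [PySem.Chars.lowerChar c] (by simp)]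
        rw [pvBTokens_cons_pos c rest hv, pvJoin_eq_head_glue]
        simp
      · have hv' : pvValid c = false := by simpa using hv
        rw [pvACore]
        simp only [hv', Bool.false_eq_true, if_false]
        rw [ih true, pvBTokens_cons_neg c rest hv']

-- ===== VERDICT (by name: the statement is the Claim_ definition above) =====
theorem normalize_search_name_py_spec : Claim_equal_normalize_search_name_py := by
  intro e _
  unfold Spec_normalize_search_name_py normalize_search_name_py normalize_search_name_py_alt
  apply String.toList_inj.mp
  simp only [String.toList_ofList, PySem.Str.toList_join, List.map_map]
  rw [pvACore_empty]
  have h : List.map (String.toList ∘ String.ofList) (pvBTokens e.toList) = pvBTokens e.toList := by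
    simp [Function.comp_def]
  rw [h, show ("_" : String).toList = ['_'] from by decide]
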